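-- pv_equiv track=rewrite | github.com/jburchel/frontier-finder | scripts/fetch_pronunciations.py | add_syllable_breaks
-- ===== SOURCE A (Python) =====
-- def add_syllable_breaks(word: str) -> str:
--     """Add basic syllable breaks to a word."""
--     vowels = 'aeiou'
--     syllables = []
--     current = ''
--     consonant_cluster = ''
--
--     for i, char in enumerate(word.lower()):
--         if char in vowels:
--             if consonant_cluster:
--                 if len(consonant_cluster) > 1:
--                     mid = len(consonant_cluster) // 2
--                     current += consonant_cluster[:mid]
--                     if current:
--                         syllables.append(current)
--                     current = consonant_cluster[mid:]
--                 else: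
--                     current += consonant_cluster
--                 consonant_cluster = ''
--             current += char
--             if i < len(word) - 1 and word[i + 1].lower() not in vowels:
--                 if current:
--                     syllables.append(current)
--                     current = ''
--         else:
--             consonant_cluster += char
--
--     # Add any remaining parts
--     if consonant_cluster:
--         current += consonant_cluster
--     if current:
--         syllables.append(current)
--
--     # Join syllables and clean up
--     result = '-'.join(syllables)
--     result = result.replace('--', '-')
--     return result.strip('-')
-- ===== SOURCE B (Python) =====
-- def add_syllable_breaks(word: str) -> str:
--     """Add basic syllable breaks to a word.
--
--     Run-based reimplementation: split the lowercased word into maximal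
--     vowel/consonant runs, then assemble syllables run by run.
--     """
--     vowels = 'aeiou'
--     w = word.lower()
--     # 1) split w into maximal runs of vowels / non-vowels
--     runs = []
--     i = 0
--     while i < len(w):
--         is_v = w[i] in vowels
--         j = i
--         while j < len(w) and (w[j] in vowels) == is_v:
--             j += 1
--         runs.append((is_v, w[i:j]))
--         i = j
--     # 2) assemble syllables
--     syllables = []
--     carry = ''
--     for k, (is_v, seg) in enumerate(runs):
--         if is_v:
--             syllables.append(carry + seg)
--             carry = ''
--         elif k + 1 < len(runs):  # consonant run followed by a vowel run
--             if len(seg) > 1: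
--                 mid = len(seg) // 2
--                 syllables.append(seg[:mid])
--                 carry = seg[mid:]
--             else:
--                 carry = seg
--         else:  # trailing consonant run (carry is empty here)
--             syllables.append(seg)
--     result = '-'.join(syllables)
--     result = result.replace('--', '-')
--     return result.strip('-')
-- ===== Notes on version B (the rewrite author's own statement) =====
-- stated objective: alternative
-- what changed: A's single character-by-character loop juggling current/cluster state with an index lookahead is replaced by a two-phase run decomposition: first split the lowercased word into maximal vowel/consonant runs, then assemble syllables run by run (split a mid cluster in half, attach the carry to the next vowel run).
import Mathlib
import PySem

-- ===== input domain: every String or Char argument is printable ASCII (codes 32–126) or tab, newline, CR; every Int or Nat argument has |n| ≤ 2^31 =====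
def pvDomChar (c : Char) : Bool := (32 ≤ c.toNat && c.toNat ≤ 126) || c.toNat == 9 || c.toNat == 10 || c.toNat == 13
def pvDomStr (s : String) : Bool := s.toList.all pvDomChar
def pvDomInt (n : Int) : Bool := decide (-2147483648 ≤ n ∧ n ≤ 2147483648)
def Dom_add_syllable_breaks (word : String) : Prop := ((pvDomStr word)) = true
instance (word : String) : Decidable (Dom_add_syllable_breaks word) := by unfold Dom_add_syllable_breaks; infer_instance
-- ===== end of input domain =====

set_option maxRecDepth 4096


-- B replaces A's single stateful char loop (current/cluster juggling with an index lookahead) by a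
-- run decomposition: split into maximal vowel/consonant runs, then assemble syllables run by run
-- (objective: alternative decomposition, same cost).

-- ===== PORT A =====
def pvVowelsA : List Char := ['a', 'e', 'i', 'o', 'u']   -- vowels = 'aeiou'

-- char in vowels  (single-character substring test)
def pvInVowA (c : Char) : Bool := PySem.Chars.isIn [c] pvVowelsA

-- i < len(word) - 1 and word[i + 1].lower() not in vowels
def pvLookA (word : List Char) (i : Int) : Bool :=
  decide (i < (word.length : Int) - 1) &&
    (match PySem.List.pyGet? word (i + 1) with
     | some c => !PySem.Chars.isIn (PySem.Chars.lower [c]) pvVowelsA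
     | none => false)

-- the "if consonant_cluster:" block of A's vowel branch; returns (syllables, current)
-- (slices cluster[:mid] / cluster[mid:] with 0 ≤ mid ≤ len are exactly take/drop)
def pvClusterStep (syls : List (List Char)) (cur clus : List Char) :
    List (List Char) × List Char :=
  if clus ≠ [] then
    if clus.length > 1 then
      let mid := clus.length / 2        -- len(consonant_cluster) // 2, nonneg: floor div = Nat div
      let cur1 := cur ++ clus.take mid  -- current += consonant_cluster[:mid]
      ((if cur1 ≠ [] then syls ++ [cur1] else syls), clus.drop mid)
    else (syls, cur ++ clus)
  else (syls, cur)

-- loop body, state = (syllables, current, consonant_cluster), p = (i, char)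
def pvStepA (word : List Char) (st : List (List Char) × List Char × List Char)
    (p : Int × Char) : List (List Char) × List Char × List Char :=
  match st with
  | (syls, cur, clus) =>
    if pvInVowA p.2 then
      let sc := pvClusterStep syls cur clus
      let cur2 := sc.2 ++ [p.2]         -- current += char  (cluster reset to '')
      if pvLookA word p.1 then
        ((if cur2 ≠ [] then sc.1 ++ [cur2] else sc.1), [], [])
      else (sc.1, cur2, [])
    else (syls, cur, clus ++ [p.2])     -- consonant_cluster += char

def add_syllable_breaks (word : String) : String :=
  let st := (PySem.List.enumerate (PySem.Chars.lower word.toList)).foldl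
              (pvStepA word.toList) ([], [], [])
  -- add any remaining parts
  let cur := if st.2.2 ≠ [] then st.2.1 ++ st.2.2 else st.2.1
  let syls := if cur ≠ [] then st.1 ++ [cur] else st.1
  -- join, collapse '--', strip '-'
  String.ofList (PySem.Chars.stripChars
    (PySem.Chars.replace (PySem.Chars.join ['-'] syls) ['-', '-'] ['-']) ['-'])

-- ===== PORT B =====
def pvVowelsB : List Char := ['a', 'e', 'i', 'o', 'u']   -- vowels = 'aeiou'

def pvInVowB (c : Char) : Bool := PySem.Chars.isIn [c] pvVowelsB

-- the two while loops: peel off the maximal run sharing the head's vowel-ness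
def pvRunsB : List Char → List (Bool × List Char)
  | [] => []
  | c :: cs =>
    let isv := pvInVowB c
    (isv, c :: cs.takeWhile (fun d => pvInVowB d == isv)) ::
      pvRunsB (cs.dropWhile (fun d => pvInVowB d == isv))
  termination_by l => l.length
  decreasing_by
    simp only [List.length_cons]
    have := List.length_dropWhile_le (fun d => pvInVowB d == pvInVowB c) cs
    omega

-- the assembly loop over the runs, with its carried half-cluster
def pvAsmB : List Char → List (Bool × List Char) → List (List Char)
  | _, [] => []
  | carry, (isv, seg) :: rest =>
    if isv then (carry ++ seg) :: pvAsmB [] rest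
    else if rest ≠ [] then                -- consonant run followed by a vowel run
      if seg.length > 1 then
        seg.take (seg.length / 2) :: pvAsmB (seg.drop (seg.length / 2)) rest
      else pvAsmB seg rest
    else seg :: pvAsmB carry rest         -- trailing consonant run

def add_syllable_breaks_alt (word : String) : String :=
  let w := PySem.Chars.lower word.toList
  let syls := pvAsmB [] (pvRunsB w)
  String.ofList (PySem.Chars.stripChars
    (PySem.Chars.replace (PySem.Chars.join ['-'] syls) ['-', '-'] ['-']) ['-'])

-- ===== PRECONDITION & SPEC =====
def Spec_add_syllable_breaks (word : String) (out : String) : Prop := out = add_syllable_breaks_alt word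
instance (word : String) (out : String) : Decidable (Spec_add_syllable_breaks word out) := by unfold Spec_add_syllable_breaks; infer_instance

-- ===== CLAIM (what is proved, stated in full; the proofs are below) =====
def Claim_equal_add_syllable_breaks : Prop := ∀ (word : String), Dom_add_syllable_breaks word → Spec_add_syllable_breaks word (add_syllable_breaks word)

-- ===== LEMMAS AND PROOFS =====

theorem pvInVow_eq (c : Char) : pvInVowA c = pvInVowB c := rfl

-- A's loop restructured as recursion on the remaining characters (lookahead = head of the tail)
def pvAuxA : (List (List Char) × List Char × List Char) → List Char →
    List (List Char) × List Char × List Char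
  | st, [] => st
  | (syls, cur, clus), c :: rest =>
    if pvInVowB c then
      let sc := pvClusterStep syls cur clus
      let cur2 := sc.2 ++ [c]
      if (match rest with | d :: _ => !pvInVowB d | [] => false) then
        pvAuxA ((if cur2 ≠ [] then sc.1 ++ [cur2] else sc.1), [], []) rest
      else pvAuxA (sc.1, cur2, []) rest
    else pvAuxA (syls, cur, clus ++ [c]) rest

-- A's post-loop "remaining parts" step
def pvFinal (st : List (List Char) × List Char × List Char) : List (List Char) :=
  let cur := if st.2.2 ≠ [] then st.2.1 ++ st.2.2 else st.2.1
  if cur ≠ [] then st.1 ++ [cur] else st.1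

-- the common run-shaped normal form both sides reach; mode true = consonant mode (acc = pending
-- cluster), mode false = vowel mode (acc = carried syllable prefix, head of l is a vowel)
def pvFin : Bool → List Char → List Char → List (List Char)
  | true, acc, l =>
    let cs := acc ++ l.takeWhile (fun d => !pvInVowB d)
    let rest := l.dropWhile (fun d => !pvInVowB d)
    if rest = [] then (if cs = [] then [] else [cs])
    else (if cs.length > 1 then [cs.take (cs.length / 2)] else []) ++
         pvFin false (if cs.length > 1 then cs.drop (cs.length / 2) else cs) rest
  | false, acc, l =>
    let v := l.takeWhile (fun d => pvInVowB d)
    if _hne : v = [] then [acc]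
    else (acc ++ v) :: pvFin true [] (l.dropWhile (fun d => pvInVowB d))
  termination_by mode _ l => 2 * l.length + (if mode then 1 else 0)
  decreasing_by
  · have h1 := List.length_dropWhile_le (fun d => !pvInVowB d) l
    simp; omega
  · have h1 : (l.takeWhile (fun d => pvInVowB d)).length +
        (l.dropWhile (fun d => pvInVowB d)).length = l.length := by
      rw [← List.length_append, List.takeWhile_append_dropWhile]
    have h2 : 1 ≤ (l.takeWhile (fun d => pvInVowB d)).length :=
      List.length_pos_of_ne_nil _hne
    simp; omega

-- one-step unfoldings of pvFin (its well-founded equations rewrite unguardedly, so we pin them)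
theorem pvFin_true_eq (acc l : List Char) : pvFin true acc l =
    (let cs := acc ++ l.takeWhile (fun d => !pvInVowB d)
     let rest := l.dropWhile (fun d => !pvInVowB d)
     if rest = [] then (if cs = [] then [] else [cs])
     else (if cs.length > 1 then [cs.take (cs.length / 2)] else []) ++
          pvFin false (if cs.length > 1 then cs.drop (cs.length / 2) else cs) rest) := by
  conv_lhs => rw [pvFin]

theorem pvFin_false_eq (acc l : List Char) : pvFin false acc l =
    (let v := l.takeWhile (fun d => pvInVowB d)
     if v = [] then [acc]
     else (acc ++ v) :: pvFin true [] (l.dropWhile (fun d => pvInVowB d))) := by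
  conv_lhs => rw [pvFin]
  simp only [dite_eq_ite]

theorem pvFin_true_nil (clus : List Char) :
    pvFin true clus [] = if clus = [] then [] else [clus] := by
  rw [pvFin_true_eq]; simp

theorem pvFin_false_nil (cur : List Char) : pvFin false cur [] = [cur] := by
  rw [pvFin_false_eq]; simp

theorem pvFin_true_cons_cons (c : Char) (l clus : List Char) (hc : pvInVowB c = false) :
    pvFin true clus (c :: l) = pvFin true (clus ++ [c]) l := by
  rw [pvFin_true_eq, pvFin_true_eq]
  simp only [List.takeWhile_cons, List.dropWhile_cons, hc, Bool.not_false, if_pos]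
  rw [List.append_cons]

theorem pvFin_true_vowel (c : Char) (l clus : List Char) (hc : pvInVowB c = true) :
    pvFin true clus (c :: l) =
      (if clus.length > 1 then [clus.take (clus.length / 2)] else []) ++
      pvFin false (if clus.length > 1 then clus.drop (clus.length / 2) else clus) (c :: l) := by
  rw [pvFin_true_eq]
  simp [hc]

theorem pvFin_false_vowel (c : Char) (l cur : List Char) (hc : pvInVowB c = true) :
    pvFin false cur (c :: l) =
      (cur ++ c :: l.takeWhile (fun d => pvInVowB d)) ::
        pvFin true [] (l.dropWhile (fun d => pvInVowB d)) := by
  rw [pvFin_false_eq]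
  simp [hc]

theorem pvClusterStep_nil_cur (syls : List (List Char)) (clus : List Char) :
    pvClusterStep syls [] clus =
      (syls ++ (if clus.length > 1 then [clus.take (clus.length / 2)] else []),
       if clus.length > 1 then clus.drop (clus.length / 2) else clus) := by
  unfold pvClusterStep
  by_cases h : clus = []
  · simp [h]
  · by_cases h2 : clus.length > 1
    · have h3 : clus.take (clus.length / 2) ≠ [] := by
        rw [Ne, List.take_eq_nil_iff]
        rintro (h2 | h2)
        · omega
        · exact h h2
      simp [h, h2, h3]
    · simp [h, h2]

theorem pvClusterStep_nil_clus (syls : List (List Char)) (cur : List Char) :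
    pvClusterStep syls cur [] = (syls, cur) := by
  simp [pvClusterStep]

theorem pvFoldA_eq_aux (word : List Char) :
    ∀ n st, (PySem.List.enumerate ((PySem.Chars.lower word).drop n) n).foldl
        (pvStepA word) st = pvAuxA st ((PySem.Chars.lower word).drop n) := by
  have hw : (PySem.Chars.lower word).length = word.length := by
    simp [PySem.Chars.lower]
  suffices H : ∀ (suf : List Char) (n : Nat) st,
      (PySem.Chars.lower word).drop n = suf →
      (PySem.List.enumerate suf n).foldl (pvStepA word) st = pvAuxA st suf by
    intro n st; exact H _ n st rfl
  intro suf
  induction suf with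
  | nil => intro n st _; simp [PySem.List.enumerate, pvAuxA]
  | cons c rest ihs =>
    intro n st h
    have hn1 : (PySem.Chars.lower word).drop (n + 1) = rest := by
      rw [← List.drop_drop (j := n) (i := 1), h]; rfl
    have hlensuf : word.length - n = rest.length + 1 := by
      have := congrArg List.length h
      simp [List.length_drop, hw] at this
      omega
    have hnlt : n < word.length := by omega
    have hlook : pvLookA word n =
        (match rest with | d :: _ => !pvInVowB d | [] => false) := by
      cases rest with
      | nil =>
        simp only [List.length_nil] at hlensuf
        have hlen1 : word.length = n + 1 := by omega
        unfold pvLookA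
        have : ¬ ((n : Int) < (word.length : Int) - 1) := by
          rw [hlen1]; omega
        simp [this]
      | cons d t =>
        simp only [List.length_cons] at hlensuf
        have hn2 : n + 1 < word.length := by omega
        have hget : PySem.List.pyGet? word ((n : Int) + 1) = some word[n + 1] := by
          have hcast : ((n : Int) + 1) = ((n + 1 : Nat) : Int) := by push_cast; ring
          rw [hcast, PySem.List.pyGet?_natCast, List.getElem?_eq_getElem hn2]
        have hd : d = PySem.Chars.lowerChar word[n + 1] := by
          have h1 : (PySem.Chars.lower word)[n + 1]? = some d := by
            have h2 := congrArg (fun l => l[1]?) h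
            simp only at h2
            rw [List.getElem?_drop] at h2
            simpa using h2
          rw [PySem.Chars.lower, List.getElem?_map, List.getElem?_eq_getElem hn2] at h1
          simp at h1
          exact h1.symm
        have hlt : ((n : Int) < (word.length : Int) - 1) := by
          omega
        unfold pvLookA
        rw [hget]
        simp only [hlt, decide_true, Bool.true_and, hd]
        rfl
    rw [PySem.List.enumerate_cons, List.foldl_cons]
    have hc1 : ((n : Int) + 1) = ((n + 1 : Nat) : Int) := by push_cast; ring
    rw [hc1, ihs (n + 1) _ hn1]
    obtain ⟨syls, cur, clus⟩ := st
    show pvAuxA (pvStepA word (syls, cur, clus) ((n : Int), c)) rest = _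
    simp only [pvStepA, pvAuxA, pvInVow_eq, hlook]
    by_cases hvc : pvInVowB c = true
    · cases rest with
      | nil => simp [hvc]
      | cons d t => by_cases hd : pvInVowB d = true <;> simp [hvc, hd]
    · simp [hvc]

theorem pvMain_nil_1 (syls : List (List Char)) (clus : List Char) :
    pvFinal (pvAuxA (syls, [], clus) []) = syls ++ pvFin true clus [] := by
  by_cases h : clus = [] <;> simp [pvAuxA, pvFinal, pvFin_true_nil, h]

theorem pvMain_nil_2 (syls : List (List Char)) (cur : List Char) (hcur : cur ≠ []) :
    pvFinal (pvAuxA (syls, cur, []) []) = syls ++ pvFin false cur [] := by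
  simp [pvAuxA, pvFinal, pvFin_false_nil, hcur]

theorem pvMainAux : ∀ (n : Nat) (l : List Char), l.length ≤ n →
    (∀ syls clus, pvFinal (pvAuxA (syls, [], clus) l) = syls ++ pvFin true clus l) ∧
    (∀ syls cur, cur ≠ [] → (l = [] ∨ ∃ d rest, l = d :: rest ∧ pvInVowB d = true) →
      pvFinal (pvAuxA (syls, cur, []) l) = syls ++ pvFin false cur l) := by
  intro n
  induction n with
  | zero =>
    intro l hl
    have hnil : l = [] := by cases l <;> simp_all
    subst hnil
    exact ⟨pvMain_nil_1, fun syls cur hcur _ => pvMain_nil_2 syls cur hcur⟩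
  | succ n ih =>
    intro l hl
    cases l with
    | nil => exact ⟨pvMain_nil_1, fun syls cur hcur _ => pvMain_nil_2 syls cur hcur⟩
    | cons c cs =>
      have hcs : cs.length ≤ n := by simp at hl; omega
      by_cases hv : pvInVowB c = true
      · -- c is a vowel
        have step : ∀ (syls' : List (List Char)) (carry : List Char),
            pvFinal (if (match cs with | d :: _ => !pvInVowB d | [] => false)
                     then pvAuxA (syls' ++ [carry ++ [c]], [], []) cs
                     else pvAuxA (syls', carry ++ [c], []) cs)
              = syls' ++ pvFin false carry (c :: cs) := by
          intro syls' carry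
          cases hcase : cs with
          | nil =>
            simp only []
            rw [if_neg (by simp)]
            rw [pvMain_nil_2 syls' (carry ++ [c]) (by simp)]
            rw [pvFin_false_vowel c [] carry hv, pvFin_false_nil]
            simp [pvFin_true_nil]
          | cons d t =>
            subst hcase
            by_cases hd : pvInVowB d = true
            · rw [if_neg (by simp [hd])]
              rw [(ih (d :: t) hcs).2 syls' (carry ++ [c]) (by simp)
                    (Or.inr ⟨d, t, rfl, hd⟩)]
              rw [pvFin_false_vowel d t _ hd, pvFin_false_vowel c (d :: t) carry hv]
              simp [hd, List.append_assoc]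
            · have hd' : pvInVowB d = false := by simpa using hd
              rw [if_pos (by simp [hd'])]
              rw [(ih (d :: t) hcs).1 (syls' ++ [carry ++ [c]]) []]
              rw [pvFin_false_vowel c (d :: t) carry hv]
              simp [hd']
        refine ⟨?_, ?_⟩
        · intro syls clus
          show pvFinal (pvAuxA (syls, [], clus) (c :: cs)) = _
          simp only [pvAuxA, hv, if_true, pvClusterStep_nil_cur]
          rw [show (if ((if clus.length > 1 then clus.drop (clus.length / 2) else clus)
                ++ [c]) ≠ [] then
                (syls ++ (if clus.length > 1 then [clus.take (clus.length / 2)] else []))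
                  ++ [(if clus.length > 1 then clus.drop (clus.length / 2) else clus) ++ [c]]
              else (syls ++ (if clus.length > 1 then [clus.take (clus.length / 2)] else [])))
              = (syls ++ (if clus.length > 1 then [clus.take (clus.length / 2)] else []))
                  ++ [(if clus.length > 1 then clus.drop (clus.length / 2) else clus) ++ [c]]
            from by simp]
          rw [step (syls ++ (if clus.length > 1 then [clus.take (clus.length / 2)] else []))
                (if clus.length > 1 then clus.drop (clus.length / 2) else clus)]
          rw [pvFin_true_vowel c cs clus hv]
          simp [List.append_assoc]
        · intro syls cur hcur _
          show pvFinal (pvAuxA (syls, cur, []) (c :: cs)) = _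
          simp only [pvAuxA, hv, if_true, pvClusterStep_nil_clus]
          rw [show (if (cur ++ [c]) ≠ [] then syls ++ [cur ++ [c]] else syls)
              = syls ++ [cur ++ [c]] from by simp]
          exact step syls cur
      · -- c is a consonant
        have hv' : pvInVowB c = false := by simpa using hv
        refine ⟨?_, ?_⟩
        · intro syls clus
          show pvFinal (pvAuxA (syls, [], clus) (c :: cs)) = _
          simp only [pvAuxA, hv', Bool.false_eq_true, if_false]
          rw [(ih cs hcs).1 syls (clus ++ [c]), pvFin_true_cons_cons c cs clus hv']
        · intro syls cur hcur hcond
          rcases hcond with h | ⟨d, rest, heq, hd⟩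
          · exact absurd h (by simp)
          · cases heq
            rw [hv'] at hd
            exact absurd hd (by simp)

theorem pvMain (l : List Char) :
    (∀ syls clus, pvFinal (pvAuxA (syls, [], clus) l) = syls ++ pvFin true clus l) ∧
    (∀ syls cur, cur ≠ [] → (l = [] ∨ ∃ d rest, l = d :: rest ∧ pvInVowB d = true) →
      pvFinal (pvAuxA (syls, cur, []) l) = syls ++ pvFin false cur l) :=
  pvMainAux l.length l le_rfl

theorem pvRunsB_nil_iff (l : List Char) : pvRunsB l = [] ↔ l = [] := by
  cases l with
  | nil => simp [pvRunsB]
  | cons c cs => rw [pvRunsB]; simp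

theorem pvAsm_eq_fin_aux : ∀ (n : Nat) (l : List Char), l.length ≤ n →
    (pvAsmB [] (pvRunsB l) = pvFin true [] l ∧
     ∀ carry d rest, l = d :: rest → pvInVowB d = true →
       pvAsmB carry (pvRunsB l) = pvFin false carry l) := by
  intro n
  induction n with
  | zero =>
    intro l hl
    have hnil : l = [] := by cases l <;> simp_all
    subst hnil
    exact ⟨by simp [pvRunsB, pvAsmB, pvFin_true_nil], fun _ _ _ h _ => by cases h⟩
  | succ n ih =>
    intro l hl
    cases l with
    | nil => exact ⟨by simp [pvRunsB, pvAsmB, pvFin_true_nil], fun _ _ _ h _ => by cases h⟩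
    | cons c cs =>
      have hcs : cs.length ≤ n := by simp at hl; omega
      by_cases hv : pvInVowB c = true
      · -- vowel-headed run
        have hruns : pvRunsB (c :: cs) =
            (true, c :: cs.takeWhile (fun d => pvInVowB d)) ::
              pvRunsB (cs.dropWhile (fun d => pvInVowB d)) := by
          rw [pvRunsB]
          simp [hv]
        have hdlen : (cs.dropWhile (fun d => pvInVowB d)).length ≤ n :=
          le_trans (List.length_dropWhile_le _ _) hcs
        have key : ∀ carry, pvAsmB carry (pvRunsB (c :: cs)) = pvFin false carry (c :: cs) := by
          intro carry
          rw [hruns]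
          simp only [pvAsmB, if_true]
          rw [(ih _ hdlen).1, pvFin_false_vowel c cs carry hv]
        refine ⟨?_, fun carry d rest h _ => by cases h; exact key carry⟩
        rw [key []]
        rw [pvFin_true_vowel c cs [] hv]
        simp
      · -- consonant-headed run
        have hv' : pvInVowB c = false := by simpa using hv
        have hruns : pvRunsB (c :: cs) =
            (false, c :: cs.takeWhile (fun d => !pvInVowB d)) ::
              pvRunsB (cs.dropWhile (fun d => !pvInVowB d)) := by
          rw [pvRunsB]
          simp [hv']
        have hdlen : (cs.dropWhile (fun d => !pvInVowB d)).length ≤ n :=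
          le_trans (List.length_dropWhile_le _ _) hcs
        refine ⟨?_, ?_⟩
        · rw [hruns]
          rw [pvFin_true_eq]
          simp only [List.takeWhile_cons, List.dropWhile_cons, hv', Bool.not_false,
            ite_true, List.nil_append]
          cases hrest : cs.dropWhile (fun d => !pvInVowB d) with
          | nil =>
            rw [if_pos rfl]
            simp [pvRunsB, pvAsmB]
          | cons d t =>
            have hd : pvInVowB d = true := by
              have hne : cs.dropWhile (fun d => !pvInVowB d) ≠ [] := by simp [hrest]
              have h2 := List.head_dropWhile_not (fun d => !pvInVowB d) hne
              simp only [hrest] at h2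
              simpa using h2
            have hrne : pvRunsB (d :: t) ≠ [] := by
              rw [Ne, pvRunsB_nil_iff]; simp
            have hlen2 : (d :: t).length ≤ n := by
              rw [← hrest]
              exact le_trans (List.length_dropWhile_le _ _) hcs
            have hfin : ∀ carry, pvAsmB carry (pvRunsB (d :: t))
                = pvFin false carry (d :: t) := by
              intro carry
              exact (ih _ hlen2).2 carry d t rfl hd
            rw [if_neg (by simp)]
            simp only [pvAsmB, if_false, Bool.false_eq_true]
            rw [if_pos hrne]
            by_cases hlen : (c :: cs.takeWhile (fun d => !pvInVowB d)).length > 1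
            · rw [if_pos hlen, if_pos hlen, if_pos hlen]
              rw [hfin _]
              simp
            · rw [if_neg hlen, if_neg hlen, if_neg hlen]
              rw [hfin _]
              simp
        · intro carry d rest h hd
          cases h
          rw [hv'] at hd
          exact absurd hd (by simp)

theorem pvAsm_eq_fin (l : List Char) :
    pvAsmB [] (pvRunsB l) = pvFin true [] l ∧
    (∀ carry d rest, l = d :: rest → pvInVowB d = true →
      pvAsmB carry (pvRunsB l) = pvFin false carry l) :=
  pvAsm_eq_fin_aux l.length l le_rfl

-- ===== VERDICT (by name: the statement is the Claim_ definition above) =====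
theorem add_syllable_breaks_spec : Claim_equal_add_syllable_breaks := by
  intro word _
  show add_syllable_breaks word = add_syllable_breaks_alt word
  have h0 := pvFoldA_eq_aux word.toList 0 ([], [], [])
  simp only [List.drop_zero, Nat.cast_zero] at h0
  have key : pvFinal ((PySem.List.enumerate (PySem.Chars.lower word.toList)).foldl
      (pvStepA word.toList) ([], [], [])) =
      pvAsmB [] (pvRunsB (PySem.Chars.lower word.toList)) := by
    rw [h0, (pvMain (PySem.Chars.lower word.toList)).1 [] [],
        (pvAsm_eq_fin (PySem.Chars.lower word.toList)).1]
    rfl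
  show String.ofList (PySem.Chars.stripChars (PySem.Chars.replace
      (PySem.Chars.join ['-'] (pvFinal ((PySem.List.enumerate
        (PySem.Chars.lower word.toList)).foldl (pvStepA word.toList) ([], [], []))))
      ['-', '-'] ['-']) ['-']) = _
  rw [key]
  rfl
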